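-- pv_equiv track=rewrite | github.com/vaizki/python-tm35fin | tm35fin/__init__.py | _name_is_legal
-- ===== SOURCE A (Python) =====
-- def _name_is_legal(name: str):
--     if len(name) < 2 or len(name) > 7:
--         return False
--     legal = ['KLMNPQRSTUVWX', '23456', '1234', '1234', '1234', 'ABCDEFGH', '1234']
--     for i,c in enumerate(name):
--         if not c in legal[i]:
--             return False
--     return True
-- ===== SOURCE B (Python) =====
-- def _name_is_legal(name: str):
--     # Regex-style nested-optional suffix match: after the two mandatory
--     # positions, each remaining character must consume the next class;
--     # running out of classes (name too long) fails, running out of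
--     # characters (short name) succeeds.
--     def opt(classes, cs):
--         if not cs:
--             return True
--         if not classes:
--             return False
--         return cs[0] in classes[0] and opt(classes[1:], cs[1:])
--     return (len(name) >= 2
--             and name[0] in 'KLMNPQRSTUVWX'
--             and name[1] in '23456'
--             and opt(['1234', '1234', '1234', 'ABCDEFGH', '1234'], name[2:]))
-- ===== Notes on version B (the rewrite author's own statement) =====
-- stated objective: alternative
-- what changed: Replaces the length-range guard plus indexed loop over a 7-entry class table with a grammar-style recursive matcher: two mandatory character classes followed by a nested-optional suffix consumed class by class, so no length upper bound or position index is ever computed.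
import Mathlib
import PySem

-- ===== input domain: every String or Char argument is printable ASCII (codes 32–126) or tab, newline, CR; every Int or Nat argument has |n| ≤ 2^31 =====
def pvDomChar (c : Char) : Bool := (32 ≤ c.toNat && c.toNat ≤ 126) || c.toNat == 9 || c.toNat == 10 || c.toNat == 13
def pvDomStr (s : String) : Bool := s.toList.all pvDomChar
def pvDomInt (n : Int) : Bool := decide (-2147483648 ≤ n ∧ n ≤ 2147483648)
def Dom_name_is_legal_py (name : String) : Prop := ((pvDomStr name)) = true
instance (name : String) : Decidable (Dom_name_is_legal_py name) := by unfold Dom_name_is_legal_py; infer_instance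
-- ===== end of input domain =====

-- B replaces A's length-range guard and indexed table loop by a grammar-style
-- recursive matcher (two mandatory character classes, then a nested-optional
-- suffix consumed class by class); same cost, alternative decomposition.

-- ===== PORT A =====
-- Loop body of A: for i,c in enumerate(name): if not c in legal[i]: return False
def pvLoopA (legal : List (List Char)) : List (Int × Char) → Bool
  | [] => true
  | (i, c) :: rest =>
      if !((PySem.List.pyGetD legal i []).contains c) then false
      else pvLoopA legal rest

def name_is_legal_py (name : String) : Bool :=
  if PySem.Str.len name < 2 || PySem.Str.len name > 7 then false
  else
    let legal : List (List Char) :=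
      ["KLMNPQRSTUVWX".toList, "23456".toList, "1234".toList, "1234".toList,
       "1234".toList, "ABCDEFGH".toList, "1234".toList]
    pvLoopA legal (PySem.List.enumerate name.toList 0)

-- ===== PORT B =====
-- B's nested-optional suffix matcher `opt`
def pvOpt : List (List Char) → List Char → Bool
  | _, [] => true
  | [], _ :: _ => false
  | cl :: cls, c :: cs => cl.contains c && pvOpt cls cs

def name_is_legal_py_alt (name : String) : Bool :=
  match name.toList with
  | c0 :: c1 :: rest =>
      "KLMNPQRSTUVWX".toList.contains c0 &&
      "23456".toList.contains c1 &&
      pvOpt ["1234".toList, "1234".toList, "1234".toList,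
             "ABCDEFGH".toList, "1234".toList] rest
  | _ => false

-- ===== PRECONDITION & SPEC =====
def Spec_name_is_legal_py (name : String) (out : Bool) : Prop := out = name_is_legal_py_alt name
instance (name : String) (out : Bool) : Decidable (Spec_name_is_legal_py name out) := by unfold Spec_name_is_legal_py; infer_instance

-- ===== CLAIM (what is proved, stated in full; the proofs are below) =====
def Claim_equal_name_is_legal_py : Prop := ∀ (name : String), Dom_name_is_legal_py name → Spec_name_is_legal_py name (name_is_legal_py name)

-- ===== LEMMAS AND PROOFS =====

theorem pvLoopA_cons (legal : List (List Char)) (i : Int) (c : Char) (rest : List (Int × Char)) :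
    pvLoopA legal ((i, c) :: rest) = ((PySem.List.pyGetD legal i []).contains c && pvLoopA legal rest) := by
  by_cases h : c ∈ PySem.List.pyGetD legal i [] <;> simp [pvLoopA, h]

theorem key_eq (l : List Char) :
    (if (l.length : Int) < 2 || (l.length : Int) > 7 then false
     else pvLoopA ["KLMNPQRSTUVWX".toList, "23456".toList, "1234".toList, "1234".toList,
                   "1234".toList, "ABCDEFGH".toList, "1234".toList]
            (PySem.List.enumerate l 0)) =
    (match l with
     | c0 :: c1 :: rest =>
         "KLMNPQRSTUVWX".toList.contains c0 &&
         "23456".toList.contains c1 &&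
         pvOpt ["1234".toList, "1234".toList, "1234".toList,
                "ABCDEFGH".toList, "1234".toList] rest
     | _ => false) := by
  rcases l with _ | ⟨c0, _ | ⟨c1, _ | ⟨c2, _ | ⟨c3, _ | ⟨c4, _ | ⟨c5, _ | ⟨c6, t⟩⟩⟩⟩⟩⟩⟩ <;>
    simp [PySem.List.enumerate_cons, PySem.List.enumerate_nil, pvLoopA_cons, pvLoopA, pvOpt,
          PySem.List.pyGetD, Bool.and_assoc]
  rcases t with _ | ⟨c7, t⟩
  · norm_num [pvLoopA, pvOpt, PySem.List.enumerate_nil]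
  · simp [pvOpt]
    omega

-- ===== VERDICT (by name: the statement is the Claim_ definition above) =====
theorem name_is_legal_py_spec : Claim_equal_name_is_legal_py := by
  intro name _
  unfold Spec_name_is_legal_py name_is_legal_py name_is_legal_py_alt
  simpa [PySem.Str.len_eq] using key_eq name.toList
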